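-- pv_equiv track=rewrite | github.com/pypi-data/pypi-mirror-175 | packages/alienpy/alienpy-1.4.6.tar.gz/alienpy-1.4.6/alienpy/fs_grid.py | extract_glob_pattern
-- ===== SOURCE A (Python) =====
-- def extract_glob_pattern(path_arg: str) -> tuple:
--     """Extract glob pattern from a path"""
--     if not path_arg: return None, None
--     base_path = pattern = None
--     if '*' in path_arg:  # we have globbing in src path
--         path_components = path_arg.split("/")
--         base_path_arr = []  # let's establish the base path
--         for el in path_components:
--             if '*' not in el: base_path_arr.append(el)
--             else: break
--
--         for el in base_path_arr: path_components.remove(el)  # remove the base path components (those without *) from full path components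
--         base_path = f'{"/".join(base_path_arr)}{"/" if base_path_arr else ""}'  # rewrite the source path without the globbing part
--         pattern = '/'.join(path_components)  # the globbing part is the rest of element that contain *
--     else:
--         base_path = path_arg
--     return (base_path, pattern)
-- ===== SOURCE B (Python) =====
-- def _first_glob_index(comps):
--     for i, el in enumerate(comps):
--         if '*' in el:
--             return i
--     return len(comps)
--
-- def extract_glob_pattern(path_arg: str) -> tuple:
--     """Extract glob pattern from a path"""
--     if not path_arg: return None, None
--     if '*' not in path_arg: return (path_arg, None)
--     comps = path_arg.split("/")
--     k = _first_glob_index(comps)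
--     base_path = '/'.join(comps[:k]) + ('/' if k > 0 else '')
--     pattern = '/'.join(comps[k:])
--     return (base_path, pattern)
-- ===== Notes on version B (the rewrite author's own statement) =====
-- stated objective: simpler
-- what changed: Replace A's build-base-list-then-remove-each-element-by-value second loop with a single pass that finds the index k of the first glob component and slices comps[:k]/comps[k:].
import Mathlib
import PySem

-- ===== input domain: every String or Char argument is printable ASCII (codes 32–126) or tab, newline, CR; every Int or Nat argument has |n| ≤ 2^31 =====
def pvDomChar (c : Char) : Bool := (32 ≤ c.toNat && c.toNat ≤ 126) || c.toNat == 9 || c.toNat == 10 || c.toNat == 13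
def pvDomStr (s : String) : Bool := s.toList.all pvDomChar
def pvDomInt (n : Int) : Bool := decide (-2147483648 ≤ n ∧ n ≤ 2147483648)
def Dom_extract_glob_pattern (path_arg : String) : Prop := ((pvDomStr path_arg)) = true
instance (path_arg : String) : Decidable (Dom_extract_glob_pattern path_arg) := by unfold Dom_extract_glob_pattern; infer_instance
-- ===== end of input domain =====

-- ===== PORT A =====
-- Simplification vs A: index-based split at the first '*' component instead of
-- build-base-list then remove-by-value. Equivalence is exact (no Pre_ needed).
-- A's first loop: append components without '*' until one with '*' (break)
def pvTakeNoStar : List String → List String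
  | [] => []
  | el :: rest => if PySem.Str.isIn "*" el = false then el :: pvTakeNoStar rest else []

-- A's second loop: for el in base_arr: path_components.remove(el).
-- Python list.remove raises only when the value is absent; here every el of
-- base_arr is present, so the .getD fallback is unreachable.
def pvRemoveAll (base : List String) (pc : List String) : List String :=
  base.foldl (fun pc el => (PySem.List.remove? pc el).getD pc) pc

def extract_glob_pattern (path_arg : String) : Option String × Option String :=
  if path_arg = "" then (none, none)
  else if PySem.Str.isIn "*" path_arg then
    let comps := (PySem.Str.split? path_arg "/").getD []
    let base_arr := pvTakeNoStar comps
    let pc := pvRemoveAll base_arr comps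
    let base := PySem.Str.join "/" base_arr ++ (if base_arr = [] then "" else "/")
    (some base, some (PySem.Str.join "/" pc))
  else (some path_arg, none)

-- ===== PORT B =====
-- B's helper: index of the first component containing '*' (length if none)
def pvFirstGlobIdx : List String → Nat
  | [] => 0
  | el :: rest => if PySem.Str.isIn "*" el then 0 else pvFirstGlobIdx rest + 1

def extract_glob_pattern_alt (path_arg : String) : Option String × Option String :=
  if path_arg = "" then (none, none)
  else if PySem.Str.isIn "*" path_arg = false then (some path_arg, none)
  else
    let comps := (PySem.Str.split? path_arg "/").getD []
    let k := pvFirstGlobIdx comps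
    let base := PySem.Str.join "/" (comps.take k) ++ (if k > 0 then "/" else "")
    (some base, some (PySem.Str.join "/" (comps.drop k)))

-- ===== PRECONDITION & SPEC =====
def Spec_extract_glob_pattern (path_arg : String) (out : Option String × Option String) : Prop := out = extract_glob_pattern_alt path_arg
instance (path_arg : String) (out : Option String × Option String) : Decidable (Spec_extract_glob_pattern path_arg out) := by unfold Spec_extract_glob_pattern; infer_instance

-- ===== CLAIM (what is proved, stated in full; the proofs are below) =====
def Claim_equal_extract_glob_pattern : Prop := ∀ (path_arg : String), Dom_extract_glob_pattern path_arg → Spec_extract_glob_pattern path_arg (extract_glob_pattern path_arg)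

-- ===== LEMMAS AND PROOFS =====

lemma takeNoStar_eq_take (l : List String) : pvTakeNoStar l = l.take (pvFirstGlobIdx l) := by
  induction l with
  | nil => rfl
  | cons el rest ih =>
    simp only [pvTakeNoStar, pvFirstGlobIdx]
    cases h : PySem.Str.isIn "*" el <;> simp [ih]

lemma removeAll_eq_drop (l : List String) : pvRemoveAll (pvTakeNoStar l) l = l.drop (pvFirstGlobIdx l) := by
  induction l with
  | nil => rfl
  | cons el rest ih =>
    simp only [pvTakeNoStar, pvFirstGlobIdx]
    cases h : PySem.Str.isIn "*" el with
    | true => simp [pvRemoveAll]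
    | false =>
      simp only [Bool.false_eq_true, if_false, ite_true, List.drop_succ_cons]
      show pvRemoveAll (el :: pvTakeNoStar rest) (el :: rest) = _
      unfold pvRemoveAll
      simp only [List.foldl_cons, PySem.List.remove?_cons_self, Option.getD_some]
      exact ih

lemma takeNoStar_nil_iff (l : List String) : (pvTakeNoStar l = []) ↔ pvFirstGlobIdx l = 0 := by
  cases l with
  | nil => simp [pvTakeNoStar, pvFirstGlobIdx]
  | cons el rest =>
    simp only [pvTakeNoStar, pvFirstGlobIdx]
    cases h : PySem.Str.isIn "*" el <;> simp

lemma if_slash (l : List String) :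
    (if pvTakeNoStar l = [] then ("" : String) else "/") = (if pvFirstGlobIdx l > 0 then "/" else "") := by
  by_cases h : pvFirstGlobIdx l = 0 <;> simp [takeNoStar_nil_iff, h, Nat.pos_iff_ne_zero]

-- ===== VERDICT (by name: the statement is the Claim_ definition above) =====
theorem extract_glob_pattern_spec : Claim_equal_extract_glob_pattern := by
  intro path_arg _
  unfold Spec_extract_glob_pattern extract_glob_pattern extract_glob_pattern_alt
  by_cases h0 : path_arg = ""
  · simp [h0]
  · simp only [h0, if_false]
    cases hin : PySem.Str.isIn "*" path_arg with
    | false => simp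
    | true =>
      simp only [Bool.true_eq_false, if_true, if_false]
      rw [if_slash, removeAll_eq_drop, takeNoStar_eq_take]
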